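/-
  THE COMPILER'S STACK INSTRUMENTATION: protected frames, and the invariant of the stack's shadow.

  gcc (`-fsanitize=kernel-address --param asan-stack=1`) gives a function with address-taken locals a PROTECTED FRAME: the locals sit,
  each in its own 16-byte-aligned slot, in an area `[base, base + size)` of the frame, separated by red zones. The PROLOGUE poisons the
  red zones with inline 4-byte stores into the shadow, the single EPILOGUE stores 0 over the same shadow bytes (c/FRAMES.txt lists every
  store). 9 of the 116 functions of the image have such a frame; the other 107 never write a shadow byte.

      FrameObj, FrameLayout    one protected frame as data (generated: c/gen_frames.py → Vorbis/Frames.lean): where `base` lies below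
                               the return address, the objects with their offsets from `base`, the prologue's and the epilogue's
                               shadow stores, and `poison`: the non-zero shadow bytes of the frame after the prologue
      FrameLayout.OK           what the two lemmas need of a layout, all DECIDABLE (each generated layout: `by decide`): the stores stay
                               inside the frame; the prologue's stores, applied to a frame whose shadow is 0, give exactly `poison`
                               (and 0 elsewhere); the epilogue's stores, applied to that, give 0 everywhere; the values are well formed;
                               every object is 8-aligned, inside the frame, has shadow 0 on its full granules and `size % 8` on a
                               partial one; the objects are in ascending order and share no granule; `raOff` is a multiple of 8
                               and the area ends at or below the return address
      FramePoisoned F base mem the shadow of the frame at `base` is what F's prologue left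
      StackClean mem lo hi     the granules of [lo, hi) have shadow 0                                       (= `Clean`)
      StackOK mem top frames   SH4: `top` (a stack pointer) is 8-aligned and in [700000H, 800000H]; EVERYTHING BELOW `top` IS CLEAN;
                               the active protected frames lie at or above `top`, each `FramePoisoned`; every other granule of
                               [top, 800000H) is 0
      stackObjs frames         the stack objects of the active protected frames
      ShadowInv others frames top mem
                               THE SHADOW LAYER IN ONE PREDICATE: `ShadowOK (stackObjs frames ++ others)`, `StackOK`, no object of
                               `others` meets the stack region, and M5's `Sealed`

  THE PROLOGUE RELIES ON A CLEAN STACK (I6 §3.1): it does NOT write the granules of the objects themselves (unless they share a DWORD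
  with a red-zone granule), so after it the objects are accessible only because the frame's shadow was 0 before. That is `StackOK.clean`.

  WHERE THE CLEAN REGION ENDS, AND HOW IT MOVES BY 8. For a function entered at `u` (u.rsp points at the return address) and returning at
  `v` (v.rsp = u.rsp + 8) the clause of every contract is

        pre   ShadowInv others frames (u.rsp + 8) u.mem             post   ShadowInv others' frames v.rsp v.mem

  — the SAME `top`, the caller's stack pointer at the `call`: the slot of the return address is part of the clean region (it is below the
  caller's rsp; the `call` wrote the return address there, not its shadow). Inside the caller, `top` follows rsp downwards freely
  (`StackOK.lower`: a push, a `sub rsp`, the `call` itself) and may go back up as far as nothing protected lies below (`StackOK.pop`).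
  A protected function with its frame at `base`: entry `top = rsp_e + 8` → after the prologue `ShadowInv others ((base, F) :: frames)
  rsp` with `rsp ≤ base` and `base + F.size ≤ rsp_e + 8` (in fact `= rsp_e − 8·pushes`) (`ShadowInv.prologue`) → body → after the
  epilogue `ShadowInv others' frames (rsp_e + 8)` again (`ShadowInv.epilogue`). Callee frames lie strictly below the caller's rsp, so
  they never meet a caller's red zone. `ShadowInv.prologue_ra` / `.epilogue_ra` are the same two steps stated with the entry stack
  pointer only (`base = rsp_e − F.raOff`); `ShadowInv.writeLE` carries the layer over any store outside the shadow.

  THE DEFAULT FRAME CONDITION of the 107 unprotected functions is SH8 of INVARIANTS.md (NOT SH7, which is "the image's constants are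
  unchanged"): the shadow region [C00000H, E00000H) is written only by the 9 prologue / epilogue pairs, `arena_poison`, `arena_unpoison`
  and `__asan_register_globals`. For a function that calls none of those it reads `ShadowUntouched u.mem v.mem`, and then everything of
  this layer is kept verbatim (`ShadowInv.untouched`). A function that allocates or frees arena blocks states the new `others` instead
  (`ShadowInv.unpoison`, `ShadowInv.poison`); a protected function's NET effect on the stack's shadow is nil.
-/
import Asan.Objects
namespace Asan
open X86 X86.User

/-! ### A protected frame as data -/

/-- One address-taken local of a protected frame: `size` bytes at `base + off`. -/
structure FrameObj where
  name : String
  off : Nat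
  size : Nat
  deriving DecidableEq, Repr

/-- **One protected frame** (c/FRAMES.txt). `base = RA − raOff`, where RA is the address of the function's return-address slot (rsp at
entry); the instrumented area is `[base, base + size)`. -/
structure FrameLayout where
  /-- the function -/
  name : String
  /-- its address: the third header word, `[base + 16]` -/
  fn : Nat
  /-- the address of the frame-description string in `.rodata`: the second header word, `[base + 8]` (the first is 41B58AB3H) -/
  descr : Nat
  /-- `base = RA − raOff` -/
  raOff : Nat
  /-- the size of the instrumented area, a multiple of 32 -/
  size : Nat
  objs : List FrameObj
  /-- the inline shadow stores of the prologue, in program order; `idx` counts granules from `base / 8` -/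
  prologue : List ShadowStore
  /-- the inline shadow stores of the single epilogue: all of value 0 -/
  epilogue : List ShadowStore
  /-- the shadow bytes of the frame after the prologue that are not 0: (index, value) -/
  poison : List (Nat × Nat)
  deriving Repr

namespace FrameLayout

/-- The shadow byte at index `i` of the frame after the prologue. -/
def shadowAt (F : FrameLayout) (i : Nat) : Nat := (F.poison.lookup i).getD 0

/-- The objects of the frame placed at `base`. -/
def objsAt (F : FrameLayout) (base : Nat) : List Obj := F.objs.map (fun o => ⟨base + o.off, o.size, .stack⟩)

/-- One object is described by the frame's shadow map: 8-aligned, inside the frame, full granules 0, a partial last granule `size % 8`. -/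
def ObjOK (F : FrameLayout) (o : FrameObj) : Prop :=
  o.off % 8 = 0 ∧ o.off + o.size ≤ F.size ∧
  (∀ i, i < (o.off + o.size) / 8 → o.off / 8 ≤ i → F.shadowAt i = 0) ∧
  (o.size % 8 ≠ 0 → F.shadowAt ((o.off + o.size) / 8) = o.size % 8)

instance (F : FrameLayout) (o : FrameObj) : Decidable (F.ObjOK o) := by
  unfold ObjOK
  infer_instance

/-- `o` ends, granule-wise, before `o'` begins. -/
def Before (o o' : FrameObj) : Prop := (o.off + o.size + 7) / 8 ≤ o'.off / 8

instance (o o' : FrameObj) : Decidable (Before o o') := by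
  unfold Before
  infer_instance

/-- **What the proof needs of a layout** — all of it decidable, so that each generated layout is checked by evaluation. -/
def OK (F : FrameLayout) : Prop :=
  F.size % 8 = 0 ∧
  (∀ s, s ∈ F.prologue → s.idx + s.width ≤ F.size / 8) ∧
  (∀ s, s ∈ F.epilogue → s.idx + s.width ≤ F.size / 8) ∧
  (∀ i, i < F.size / 8 → storesByte F.prologue i 0 = F.shadowAt i) ∧
  (∀ i, i < F.size / 8 → storesByte F.epilogue i (F.shadowAt i) = 0) ∧
  (∀ i, i < F.size / 8 → WFv (F.shadowAt i)) ∧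
  (∀ o, o ∈ F.objs → F.ObjOK o) ∧
  F.objs.Pairwise Before ∧
  F.raOff % 8 = 0 ∧
  F.size ≤ F.raOff

instance (F : FrameLayout) : Decidable F.OK := by
  unfold OK
  infer_instance

end FrameLayout

/-- **The shadow of the frame at `base` is what the prologue left**: poisoned red zones, partial values, 0 on the objects. -/
def FramePoisoned (F : FrameLayout) (base : Nat) (mem : Mem) : Prop :=
  ∀ i, i < F.size / 8 → shadowOf mem (base / 8 + i) = F.shadowAt i

/-- A function that writes no shadow byte of the frame keeps it poisoned. -/
theorem FramePoisoned.of_same {F : FrameLayout} {base : Nat} {mem mem' : Mem} (h : FramePoisoned F base mem)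
    (hs : ∀ i, i < F.size / 8 → shadowOf mem' (base / 8 + i) = shadowOf mem (base / 8 + i)) : FramePoisoned F base mem' := by
  intro i hi
  rw [hs i hi]
  exact h i hi

/-- **The stack region `[lo, hi)` is clean**: its granules have shadow 0. -/
abbrev StackClean (mem : Mem) (lo hi : Nat) : Prop := Clean mem lo hi

/-! ### The two lemmas of a protected function, on `ShadowOK` -/

namespace FrameLayout
variable {F : FrameLayout} {objs : List Obj} {mem : Mem} {base : Nat}

/-- An object of the frame at `base`, from the list. -/
theorem mem_objsAt {o : Obj} (h : o ∈ F.objsAt base) : ∃ fo, fo ∈ F.objs ∧ o = ⟨base + fo.off, fo.size, .stack⟩ := by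
  unfold objsAt at h
  obtain ⟨fo, hfo, e⟩ := List.mem_map.mp h
  exact ⟨fo, hfo, e.symm⟩

/-- The granules of an object of the frame are granules of the frame. -/
theorem objsAt_gran (hF : F.OK) (h8 : base % 8 = 0) {o : Obj} (h : o ∈ F.objsAt base) :
    base / 8 ≤ o.gLo ∧ o.gHi ≤ (base + F.size) / 8 := by
  obtain ⟨hs8, _, _, _, _, _, hobj, _⟩ := hF
  obtain ⟨fo, hfo, rfl⟩ := mem_objsAt h
  obtain ⟨k1, k2, _, _⟩ := hobj fo hfo
  unfold Obj.gLo Obj.gHi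
  simp only
  omega

/-- The objects of one frame share no granule. -/
theorem objsAt_pairwise (hF : F.OK) (h8 : base % 8 = 0) : (F.objsAt base).Pairwise GranDisj := by
  obtain ⟨_, _, _, _, _, _, hobj, hbefore, _, _⟩ := hF
  unfold objsAt
  rw [List.pairwise_map]
  refine List.Pairwise.imp_of_mem ?_ hbefore
  intro o o' ho ho' hb
  obtain ⟨k1, _, _, _⟩ := hobj o ho
  obtain ⟨k1', _, _, _⟩ := hobj o' ho'
  unfold Before at hb
  unfold GranDisj Obj.gLo Obj.gHi
  simp only
  omega

/-- **The shadow after the prologue's stores**, on a frame whose shadow was 0: `FramePoisoned`. -/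
theorem prologue_poisoned (hF : F.OK) (h8 : base % 8 = 0) (hhi : base + F.size ≤ 0x800000)
    (hclean : StackClean mem base (base + F.size)) : FramePoisoned F base (storesMem mem (base / 8) F.prologue) := by
  obtain ⟨hs8, hpin, _, hgives, _, _, _, _⟩ := hF
  intro i hi
  rw [shadowOf_storesMem mem (base / 8) (F.size / 8) F.prologue hpin (by omega) i (by omega)]
  rw [hclean (base / 8 + i) (by omega) (by omega)]
  exact hgives i hi

/-- **The shadow after the epilogue's stores**, on a poisoned frame: clean again. -/
theorem epilogue_clean (hF : F.OK) (h8 : base % 8 = 0) (hhi : base + F.size ≤ 0x800000) (hp : FramePoisoned F base mem) :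
    StackClean (storesMem mem (base / 8) F.epilogue) base (base + F.size) := by
  obtain ⟨hs8, _, hein, _, hzero, _, _, _⟩ := hF
  intro g hg1 hg2
  have e : g = base / 8 + (g - base / 8) := by omega
  rw [e, shadowOf_storesMem mem (base / 8) (F.size / 8) F.epilogue hein (by omega) (g - base / 8) (by omega)]
  rw [hp (g - base / 8) (by omega)]
  exact hzero (g - base / 8) (by omega)

/-- A poisoned frame describes its objects exactly. -/
theorem coversObj_of_poisoned (hF : F.OK) (h8 : base % 8 = 0) (hlo : 0x700000 ≤ base) (hhi : base + F.size ≤ 0x800000)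
    (hp : FramePoisoned F base mem) {o : Obj} (ho : o ∈ F.objsAt base) : CoversObj mem o := by
  obtain ⟨hs8, _, _, _, _, _, hobj, _⟩ := hF
  obtain ⟨fo, hfo, rfl⟩ := mem_objsAt ho
  obtain ⟨k1, k2, k3, k4⟩ := hobj fo hfo
  refine ⟨?_, ?_, ?_, ?_, ?_⟩
  · show (base + fo.off) % 8 = 0
    omega
  · show 0x100000 ≤ base + fo.off
    omega
  · show base + fo.off + fo.size ≤ 0xC00000
    omega
  · intro g hg1 hg2
    have hg1' : (base + fo.off) / 8 ≤ g := hg1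
    have hg2' : g < (base + fo.off + fo.size) / 8 := hg2
    have e : g = base / 8 + (g - base / 8) := by omega
    rw [e, hp (g - base / 8) (by omega)]
    exact k3 (g - base / 8) (by omega) (by omega)
  · intro hne
    have hne' : fo.size % 8 ≠ 0 := hne
    show shadowOf mem ((base + fo.off + fo.size) / 8) = fo.size % 8
    have e : (base + fo.off + fo.size) / 8 = base / 8 + (fo.off + fo.size) / 8 := by omega
    rw [e, hp ((fo.off + fo.size) / 8) (by omega)]
    exact k4 hne'

/-- **AFTER THE PROLOGUE: `ShadowOK (frame objects ++ objs)`.** The frame's area was clean, and no live object has a granule in it. -/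
theorem prologue_shadowOK (hF : F.OK) (h8 : base % 8 = 0) (hlo : 0x700000 ≤ base) (hhi : base + F.size ≤ 0x800000)
    (hok : ShadowOK objs mem) (hclean : StackClean mem base (base + F.size))
    (hoff : ∀ o, o ∈ objs → o.gHi ≤ base / 8 ∨ (base + F.size) / 8 ≤ o.gLo) :
    ShadowOK (F.objsAt base ++ objs) (storesMem mem (base / 8) F.prologue) := by
  have hp := prologue_poisoned hF h8 hhi hclean
  have hF' := hF
  obtain ⟨hs8, hpin, _, _, _, hwf, _, _⟩ := hF'
  refine hok.change (base / 8) ((base + F.size) / 8) ?_ ?_ ?_ ?_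
  · intro g hg hout
    exact shadowOf_storesMem_other mem (base / 8) (F.size / 8) F.prologue hpin (by omega) g hg (by omega)
  · intro g hg hg1 hg2
    have e : g = base / 8 + (g - base / 8) := by omega
    rw [e, hp (g - base / 8) (by omega)]
    exact hwf (g - base / 8) (by omega)
  · intro o ho
    rcases List.mem_append.mp ho with hnew | hold
    · exact Or.inr (coversObj_of_poisoned hF h8 hlo hhi hp hnew).covers
    · exact Or.inl ⟨hold, hoff o hold⟩
  · rw [List.pairwise_append]
    refine ⟨objsAt_pairwise hF h8, hok.disjoint, ?_⟩
    intro o ho o' ho'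
    have hin := objsAt_gran hF h8 ho
    have hout := hoff o' ho'
    unfold GranDisj
    omega

/-- **AFTER THE EPILOGUE: `ShadowOK objs` again**, whatever happened to `objs` in between. -/
theorem epilogue_shadowOK (hF : F.OK) (h8 : base % 8 = 0) (hhi : base + F.size ≤ 0x800000)
    (hok : ShadowOK (F.objsAt base ++ objs) mem) (hp : FramePoisoned F base mem)
    (hoff : ∀ o, o ∈ objs → o.gHi ≤ base / 8 ∨ (base + F.size) / 8 ≤ o.gLo) :
    ShadowOK objs (storesMem mem (base / 8) F.epilogue) := by
  have hc := epilogue_clean hF h8 hhi hp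
  obtain ⟨hs8, _, hein, _, _, _, _, _⟩ := hF
  refine hok.change (base / 8) ((base + F.size) / 8) ?_ ?_ ?_ ?_
  · intro g hg hout
    exact shadowOf_storesMem_other mem (base / 8) (F.size / 8) F.epilogue hein (by omega) g hg (by omega)
  · intro g hg hg1 hg2
    rw [hc g hg1 hg2]
    unfold WFv
    omega
  · intro o ho
    exact Or.inl ⟨List.mem_append_right _ ho, hoff o ho⟩
  · exact (List.pairwise_append.mp hok.disjoint).2.1

end FrameLayout

/-! ### The stack's shadow -/

/-- **SH4: the shadow of the stack region.** `top` is a stack pointer: everything below it is clean; the active protected frames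
(innermost first) lie at or above it and are poisoned as their prologues left them; the rest of `[top, 800000H)` is clean too. -/
structure StackOK (mem : Mem) (top : Nat) (frames : List (Nat × FrameLayout)) : Prop where
  aligned : top % 8 = 0
  lo : 0x700000 ≤ top
  hi : top ≤ 0x800000
  /-- everything below `top` is clean: what the next prologue relies on -/
  clean : StackClean mem 0x700000 top
  /-- the active protected frames -/
  active : ∀ bF, bF ∈ frames →
    bF.2.OK ∧ bF.1 % 8 = 0 ∧ top ≤ bF.1 ∧ bF.1 + bF.2.size ≤ 0x800000 ∧ FramePoisoned bF.2 bF.1 mem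
  /-- the granules at and above `top` that belong to no protected frame -/
  rest : ∀ g, top / 8 ≤ g → g < 0x800000 / 8 → (∀ bF, bF ∈ frames → g < bF.1 / 8 ∨ (bF.1 + bF.2.size) / 8 ≤ g) →
    shadowOf mem g = 0

namespace StackOK
variable {mem mem' : Mem} {top top' : Nat} {frames : List (Nat × FrameLayout)}

/-- The stack pointer goes down (a push, `sub rsp`, a `call`): the clean region shrinks. -/
theorem lower (h : StackOK mem top frames) (ht : top' ≤ top) (h8 : top' % 8 = 0) (hlo : 0x700000 ≤ top') :
    StackOK mem top' frames := by
  refine ⟨h8, hlo, Nat.le_trans ht h.hi, h.clean.mono (Nat.le_refl _) ht, ?_, ?_⟩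
  · intro bF hbF
    obtain ⟨k1, k2, k3, k4, k5⟩ := h.active bF hbF
    exact ⟨k1, k2, Nat.le_trans ht k3, k4, k5⟩
  · intro g hg1 hg2 hout
    by_cases hg : g < top / 8
    · exact h.clean g (by omega) hg
    · exact h.rest g (by omega) hg2 hout

/-- The stack pointer goes up over unprotected stack (`add rsp`, pops, `ret`): allowed up to the innermost protected frame. -/
theorem raise (h : StackOK mem top frames) (ht : top ≤ top') (h8 : top' % 8 = 0) (hhi : top' ≤ 0x800000)
    (hfr : ∀ bF, bF ∈ frames → top' ≤ bF.1) : StackOK mem top' frames := by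
  have ha := h.aligned
  refine ⟨h8, Nat.le_trans h.lo ht, hhi, ?_, ?_, ?_⟩
  · intro g hg1 hg2
    by_cases hg : g < top / 8
    · exact h.clean g hg1 hg
    · refine h.rest g (by omega) (by omega) ?_
      intro bF hbF
      have := hfr bF hbF
      obtain ⟨_, k2, _, _, _⟩ := h.active bF hbF
      omega
  · intro bF hbF
    obtain ⟨k1, k2, k3, k4, k5⟩ := h.active bF hbF
    exact ⟨k1, k2, hfr bF hbF, k4, k5⟩
  · intro g hg1 hg2 hout
    exact h.rest g (by omega) hg2 hout

/-- The stack's shadow did not change. -/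
theorem of_same (h : StackOK mem top frames)
    (hs : ∀ g, 0x700000 / 8 ≤ g → g < 0x800000 / 8 → shadowOf mem' g = shadowOf mem g) : StackOK mem' top frames := by
  have ha := h.aligned
  have hhi := h.hi
  refine ⟨h.aligned, h.lo, h.hi, ?_, ?_, ?_⟩
  · intro g hg1 hg2
    rw [hs g hg1 (by omega)]
    exact h.clean g hg1 hg2
  · intro bF hbF
    obtain ⟨k1, k2, k3, k4, k5⟩ := h.active bF hbF
    refine ⟨k1, k2, k3, k4, k5.of_same ?_⟩
    intro i hi
    have hs8 := k1.1
    have hlo := h.lo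
    exact hs (bF.1 / 8 + i) (by omega) (by omega)
  · intro g hg1 hg2 hout
    have hlo := h.lo
    rw [hs g (by omega) hg2]
    exact h.rest g hg1 hg2 hout

/-- A store outside the shadow keeps it. -/
theorem eqOn (h : StackOK mem top frames) (he : Mem.EqOn 0xC00000 0xE00000 mem mem') : StackOK mem' top frames :=
  h.of_same (fun g _ hg2 => shadowOf_eqOn he g (by omega))

/-- **After the prologue of a protected function**: its frame at `base`, below the old `top`, is the innermost; the new `top'` is the
stack pointer of the body. -/
theorem push (h : StackOK mem top frames) {F : FrameLayout} (hF : F.OK) {base : Nat} (hb8 : base % 8 = 0)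
    (hb : base + F.size ≤ top) (ht : top' ≤ base) (h8 : top' % 8 = 0) (hlo : 0x700000 ≤ top') :
    StackOK (storesMem mem (base / 8) F.prologue) top' ((base, F) :: frames) := by
  have ha := h.aligned
  have hhi := h.hi
  have hF' := hF
  obtain ⟨hs8, hpin, _, _, _, _, _, _⟩ := hF'
  have hother : ∀ g, g < 0x200000 → (g < base / 8 ∨ (base + F.size) / 8 ≤ g) →
      shadowOf (storesMem mem (base / 8) F.prologue) g = shadowOf mem g := by
    intro g hg hout
    exact shadowOf_storesMem_other mem (base / 8) (F.size / 8) F.prologue hpin (by omega) g hg (by omega)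
  refine ⟨h8, hlo, by omega, ?_, ?_, ?_⟩
  · intro g hg1 hg2
    rw [hother g (by omega) (by omega)]
    exact h.clean g hg1 (by omega)
  · intro bF hbF
    rcases List.mem_cons.mp hbF with rfl | hold
    · have hb2 : base + F.size ≤ 0x800000 := by omega
      exact ⟨hF, hb8, ht, hb2, FrameLayout.prologue_poisoned hF hb8 hb2 (h.clean.mono (by omega) hb)⟩
    · obtain ⟨k1, k2, k3, k4, k5⟩ := h.active bF hold
      refine ⟨k1, k2, by omega, k4, k5.of_same ?_⟩
      intro i hi
      have hs8' := k1.1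
      exact hother (bF.1 / 8 + i) (by omega) (by omega)
  · intro g hg1 hg2 hout
    have hnew := hout (base, F) List.mem_cons_self
    simp only at hnew
    rw [hother g (by omega) hnew]
    by_cases hg : g < top / 8
    · exact h.clean g (by omega) hg
    · exact h.rest g (by omega) hg2 (fun bF hbF => hout bF (List.mem_cons_of_mem _ hbF))

/-- **After the epilogue of a protected function**: its frame is gone and clean; `top'` may be anything up to the next protected frame
(for the function's `ret`: the entry rsp + 8). -/
theorem pop {F : FrameLayout} {base : Nat} (h : StackOK mem top ((base, F) :: frames)) (ht : top ≤ top') (h8 : top' % 8 = 0)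
    (hhi : top' ≤ 0x800000) (hb : base + F.size ≤ top') (hfr : ∀ bF, bF ∈ frames → top' ≤ bF.1) :
    StackOK (storesMem mem (base / 8) F.epilogue) top' frames := by
  have ha := h.aligned
  have hlo := h.lo
  obtain ⟨hF, hb8, hb1, hb2, hp⟩ := h.active (base, F) List.mem_cons_self
  simp only at hb8 hb1 hb2 hp
  have hc := FrameLayout.epilogue_clean hF hb8 hb2 hp
  have hF' := hF
  obtain ⟨hs8, _, hein, _, _, _, _, _⟩ := hF'
  have hother : ∀ g, g < 0x200000 → (g < base / 8 ∨ (base + F.size) / 8 ≤ g) →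
      shadowOf (storesMem mem (base / 8) F.epilogue) g = shadowOf mem g := by
    intro g hg hout
    exact shadowOf_storesMem_other mem (base / 8) (F.size / 8) F.epilogue hein (by omega) g hg (by omega)
  refine ⟨h8, by omega, hhi, ?_, ?_, ?_⟩
  · intro g hg1 hg2
    by_cases hin : base / 8 ≤ g ∧ g < (base + F.size) / 8
    · exact hc g hin.1 hin.2
    · rw [hother g (by omega) (by omega)]
      by_cases hg : g < top / 8
      · exact h.clean g hg1 hg
      · refine h.rest g (by omega) (by omega) ?_
        intro bF hbF
        rcases List.mem_cons.mp hbF with rfl | hold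
        · simp only
          omega
        · have := hfr bF hold
          obtain ⟨_, k2, _, _, _⟩ := h.active bF hbF
          omega
  · intro bF hbF
    obtain ⟨k1, k2, k3, k4, k5⟩ := h.active bF (List.mem_cons_of_mem _ hbF)
    have := hfr bF hbF
    refine ⟨k1, k2, this, k4, k5.of_same ?_⟩
    intro i hi
    have hs8' := k1.1
    exact hother (bF.1 / 8 + i) (by omega) (by omega)
  · intro g hg1 hg2 hout
    rw [hother g (by omega) (by omega)]
    refine h.rest g (by omega) hg2 ?_
    intro bF hbF
    rcases List.mem_cons.mp hbF with rfl | hold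
    · simp only
      omega
    · exact hout bF hold

end StackOK

/-! ### The shadow layer in one predicate -/

/-- The stack objects of the active protected frames. -/
def stackObjs (frames : List (Nat × FrameLayout)) : List Obj := frames.flatMap (fun bF => bF.2.objsAt bF.1)

theorem stackObjs_cons (base : Nat) (F : FrameLayout) (frames : List (Nat × FrameLayout)) :
    stackObjs ((base, F) :: frames) = F.objsAt base ++ stackObjs frames := by
  unfold stackObjs
  rw [List.flatMap_cons]

/-- The object does not meet the stack region `[700000H, 800000H)`: everything but a stack object. -/
def OffStack (o : Obj) : Prop := o.base + o.size ≤ 0x700000 ∨ 0x800000 ≤ o.base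

instance (o : Obj) : Decidable (OffStack o) := by
  unfold OffStack
  infer_instance

/-- **THE SHADOW LAYER**: the live objects are the stack objects of the active protected frames and `others` (globals, input,
output, arena blocks), none of which meets the stack region; `top` is the stack pointer below which the stack is clean. The clause
of every contract: see the header for how `top` relates to rsp at entry and at return. -/
structure ShadowInv (others : List Obj) (frames : List (Nat × FrameLayout)) (top : Nat) (mem : Mem) : Prop where
  shadow : ShadowOK (stackObjs frames ++ others) mem
  stack : StackOK mem top frames
  off : ∀ o, o ∈ others → OffStack o
  /-- M5's seal: nothing outside `[100000H, C00000H)` passes a check — what turns a passed check into `L.Has` of the access -/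
  sealed : Sealed mem

/-- **The default frame condition of a function (SH8)**: it writes no byte of the shadow region. -/
def ShadowUntouched (mem mem' : Mem) : Prop := Mem.EqOn 0xC00000 0xE00000 mem mem'

namespace ShadowInv
variable {others others' : List Obj} {frames : List (Nat × FrameLayout)} {top top' : Nat} {mem mem' : Mem}

/-- A stack object of an active frame has its granules inside the frame. -/
theorem stackObj_gran (h : StackOK mem top frames) {o : Obj} (ho : o ∈ stackObjs frames) :
    ∃ bF, bF ∈ frames ∧ bF.1 / 8 ≤ o.gLo ∧ o.gHi ≤ (bF.1 + bF.2.size) / 8 := by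
  unfold stackObjs at ho
  obtain ⟨bF, hbF, hin⟩ := List.mem_flatMap.mp ho
  obtain ⟨k1, k2, _, _, _⟩ := h.active bF hbF
  exact ⟨bF, hbF, FrameLayout.objsAt_gran k1 k2 hin⟩

/-- **A function that writes no shadow byte keeps the whole layer.** -/
theorem untouched (h : ShadowInv others frames top mem) (he : ShadowUntouched mem mem') : ShadowInv others frames top mem' :=
  ⟨h.shadow.eqOn he, h.stack.eqOn he, h.off, h.sealed.eqOn he⟩

/-- The stack pointer goes down. -/
theorem lower (h : ShadowInv others frames top mem) (ht : top' ≤ top) (h8 : top' % 8 = 0) (hlo : 0x700000 ≤ top') :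
    ShadowInv others frames top' mem :=
  ⟨h.shadow, h.stack.lower ht h8 hlo, h.off, h.sealed⟩

/-- The stack pointer goes up over unprotected stack. -/
theorem raise (h : ShadowInv others frames top mem) (ht : top ≤ top') (h8 : top' % 8 = 0) (hhi : top' ≤ 0x800000)
    (hfr : ∀ bF, bF ∈ frames → top' ≤ bF.1) : ShadowInv others frames top' mem :=
  ⟨h.shadow, h.stack.raise ht h8 hhi hfr, h.off, h.sealed⟩

/-- A check site in one of the `others`. -/
theorem obj_other (h : ShadowInv others frames top mem) {o : Obj} (ho : o ∈ others) : Covers o.Bytes mem :=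
  h.shadow.obj (List.mem_append_right _ ho)

/-- A check site in a stack object of an active protected frame (the function's own, or a caller's whose address was passed down). -/
theorem obj_frame (h : ShadowInv others frames top mem) {base : Nat} {F : FrameLayout} (hF : (base, F) ∈ frames)
    {o : Obj} (ho : o ∈ F.objsAt base) : Covers o.Bytes mem := by
  apply h.shadow.obj
  apply List.mem_append_left
  unfold stackObjs
  exact List.mem_flatMap.mpr ⟨(base, F), hF, ho⟩

/-- No live object other than the new frame's has a granule in the area `[base, base + size)` below `top`. -/
theorem off_area (h : ShadowInv others frames top mem) {base size : Nat} (hlo : 0x700000 ≤ base) (hb : base + size ≤ top)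
    (h8 : base % 8 = 0) {o : Obj} (ho : o ∈ stackObjs frames ++ others) : o.gHi ≤ base / 8 ∨ (base + size) / 8 ≤ o.gLo := by
  have hhi := h.stack.hi
  rcases List.mem_append.mp ho with hst | hoth
  · obtain ⟨bF, hbF, k1, k2⟩ := stackObj_gran h.stack hst
    obtain ⟨_, j2, j3, _, _⟩ := h.stack.active bF hbF
    right
    omega
  · have := h.off o hoth
    unfold OffStack at this
    unfold Obj.gLo Obj.gHi
    omega

/-- **AFTER THE PROLOGUE of a protected function** whose frame is at `base`, with `base + F.size ≤ top` (the old stack pointer) and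
the body's stack pointer `top' ≤ base`: the frame's objects are live, the frame is the innermost. -/
theorem prologue (h : ShadowInv others frames top mem) {F : FrameLayout} (hF : F.OK) {base : Nat} (hb8 : base % 8 = 0)
    (hb : base + F.size ≤ top) (ht : top' ≤ base) (h8 : top' % 8 = 0) (hlo : 0x700000 ≤ top') :
    ShadowInv others ((base, F) :: frames) top' (storesMem mem (base / 8) F.prologue) := by
  have hhi := h.stack.hi
  have hF' := hF
  obtain ⟨hs8, hpin, _, _, _, _, _, _⟩ := hF'
  refine ⟨?_, h.stack.push hF hb8 hb ht h8 hlo, h.off,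
    sealed_storesMem h.sealed (base / 8) (F.size / 8) F.prologue hpin (by omega) (by omega)⟩
  rw [stackObjs_cons, List.append_assoc]
  refine FrameLayout.prologue_shadowOK hF hb8 (by omega) (by omega) h.shadow (h.stack.clean.mono (by omega) hb) ?_
  intro o ho
  exact h.off_area (by omega) hb hb8 ho

/-- **AFTER THE EPILOGUE**: the frame's objects are dead, its area is clean, and `top'` — any stack pointer up to the next protected
frame, for the `ret` the entry rsp + 8 — bounds the clean region again. -/
theorem epilogue {F : FrameLayout} {base : Nat} (h : ShadowInv others ((base, F) :: frames) top mem) (ht : top ≤ top')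
    (h8 : top' % 8 = 0) (hhi : top' ≤ 0x800000) (hb : base + F.size ≤ top') (hfr : ∀ bF, bF ∈ frames → top' ≤ bF.1) :
    ShadowInv others frames top' (storesMem mem (base / 8) F.epilogue) := by
  obtain ⟨hF, hb8, hb1, hb2, hp⟩ := h.stack.active (base, F) List.mem_cons_self
  simp only at hb8 hb1 hb2 hp
  have hlo := h.stack.lo
  have hF' := hF
  obtain ⟨hs8, _, hein, _, _, _, _, _⟩ := hF'
  refine ⟨?_, h.stack.pop ht h8 hhi hb hfr, h.off,
    sealed_storesMem h.sealed (base / 8) (F.size / 8) F.epilogue hein (by omega) (by omega)⟩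
  have hsh := h.shadow
  rw [stackObjs_cons, List.append_assoc] at hsh
  refine FrameLayout.epilogue_shadowOK hF hb8 hb2 hsh hp ?_
  intro o ho
  rcases List.mem_append.mp ho with hst | hoth
  · unfold stackObjs at hst
    obtain ⟨bF, hbF, hin⟩ := List.mem_flatMap.mp hst
    obtain ⟨k1, k2, _, _, _⟩ := h.stack.active bF (List.mem_cons_of_mem _ hbF)
    have hg := FrameLayout.objsAt_gran k1 k2 hin
    have := hfr bF hbF
    right
    omega
  · have := h.off o hoth
    unfold OffStack at this
    unfold Obj.gLo Obj.gHi
    omega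

/-- **The prologue, in terms of the entry stack pointer** `ra` (the address of the return-address slot): the frame is at
`ra − F.raOff`; the contract's `top` at entry is `ra + 8`; `top'` is the stack pointer of the body. -/
theorem prologue_ra (h : ShadowInv others frames (top + 8) mem) {F : FrameLayout} (hF : F.OK) (hra : top % 8 = 0)
    (ht : top' ≤ top - F.raOff) (h8 : top' % 8 = 0) (hlo : 0x700000 ≤ top') :
    ShadowInv others ((top - F.raOff, F) :: frames) top' (storesMem mem ((top - F.raOff) / 8) F.prologue) := by
  have hF' := hF
  obtain ⟨_, _, _, _, _, _, _, _, hr8, hrs⟩ := hF'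
  exact h.prologue hF (by omega) (by omega) ht h8 hlo

/-- **The epilogue, in terms of the entry stack pointer** `ra`: afterwards `top` is `ra + 8` again, the stack pointer after the `ret`. -/
theorem epilogue_ra {F : FrameLayout} (h : ShadowInv others ((top - F.raOff, F) :: frames) top' mem) (hra : top % 8 = 0)
    (hhi : top + 8 ≤ 0x800000) (hfr : ∀ bF, bF ∈ frames → top + 8 ≤ bF.1) :
    ShadowInv others frames (top + 8) (storesMem mem ((top - F.raOff) / 8) F.epilogue) := by
  have hact := h.stack.active (top - F.raOff, F) List.mem_cons_self
  simp only at hact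
  obtain ⟨hF, _, hb1, _, _⟩ := hact
  obtain ⟨_, _, _, _, _, _, _, _, hr8, hrs⟩ := hF
  have hlo := h.stack.lo
  exact h.epilogue (by omega) (by omega) hhi (by omega) hfr

/-- **A store outside the shadow** (into a live object, a spill slot, a push) keeps the layer. -/
theorem writeLE (h : ShadowInv others frames top mem) (a : Word) (k v : Nat) (hk : a.toNat + k < 2 ^ 64)
    (hd : a.toNat + k ≤ 0xC00000 ∨ 0xE00000 ≤ a.toNat) : ShadowInv others frames top (mem.writeLE a k v) :=
  h.untouched (eqOn_shadow_writeLE mem a k v hk hd)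

/-- **THE GENERAL STEP for the `others`** (arena and globals events): the shadow changes on granules `[g0, g1)` outside the stack's
shadow; every object of the new `others` is an old one away from `[g0, g1)` or is covered in the new memory. -/
theorem change (h : ShadowInv others frames top mem) (g0 g1 : Nat) (hstack : g1 ≤ 0x700000 / 8 ∨ 0x800000 / 8 ≤ g0)
    (hdata : 0x20000 ≤ g0 ∧ g1 ≤ 0x180000)
    (hsame : ∀ g, g < 0x200000 → (g < g0 ∨ g1 ≤ g) → shadowOf mem' g = shadowOf mem g)
    (hwf : ∀ g, g < 0x200000 → g0 ≤ g → g < g1 → WFv (shadowOf mem' g))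
    (hobjs : ∀ o, o ∈ others' → (o ∈ others ∧ (o.gHi ≤ g0 ∨ g1 ≤ o.gLo)) ∨ Covers o.Bytes mem')
    (hoff : ∀ o, o ∈ others' → OffStack o)
    (hdisj : others'.Pairwise GranDisj) : ShadowInv others' frames top mem' := by
  have hlo := h.stack.lo
  have hhi := h.stack.hi
  refine ⟨?_, h.stack.of_same (fun g hg1 hg2 => hsame g (by omega) (by omega)), hoff,
    h.sealed.of_same g0 g1 hdata.1 hdata.2 hsame⟩
  refine h.shadow.change g0 g1 hsame hwf ?_ ?_
  · intro o ho
    rcases List.mem_append.mp ho with hst | hoth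
    · left
      refine ⟨List.mem_append_left _ hst, ?_⟩
      obtain ⟨bF, hbF, k1, k2⟩ := stackObj_gran h.stack hst
      obtain ⟨_, j2, j3, j4, _⟩ := h.stack.active bF hbF
      omega
    · rcases hobjs o hoth with ⟨hold, hout⟩ | hnew
      · exact Or.inl ⟨List.mem_append_right _ hold, hout⟩
      · exact Or.inr hnew
  · rw [List.pairwise_append]
    refine ⟨(List.pairwise_append.mp h.shadow.disjoint).1, hdisj, ?_⟩
    intro o ho o' ho'
    obtain ⟨bF, hbF, k1, k2⟩ := stackObj_gran h.stack ho
    obtain ⟨_, j2, j3, j4, _⟩ := h.stack.active bF hbF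
    have := hoff o' ho'
    unfold OffStack at this
    unfold GranDisj
    unfold Obj.gLo Obj.gHi at *
    omega

/-- **`arena_unpoison(o.base, o.size)`: + one arena block** (or any object off the stack). -/
theorem unpoison (h : ShadowInv others frames top mem) (o : Obj) (h8 : o.base % 8 = 0) (hlo : 0x100000 ≤ o.base)
    (hhi : o.base + o.size ≤ 0xC00000) (hoff : OffStack o) (hdisj : ∀ o', o' ∈ others → GranDisj o o') :
    ShadowInv (o :: others) frames top (unpoisonMem mem o.base o.size) := by
  refine h.change o.gLo o.gHi ?_ ?_ ?_ ?_ ?_ ?_ ?_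
  · unfold OffStack at hoff
    unfold Obj.gLo Obj.gHi
    omega
  · unfold Obj.gLo Obj.gHi
    omega
  · intro g hg hout
    unfold Obj.gLo Obj.gHi at hout
    exact shadowOf_unpoisonMem_out mem o.base o.size g h8 hhi hg hout
  · intro g hg hg1 hg2
    unfold Obj.gLo at hg1
    unfold Obj.gHi at hg2
    unfold WFv
    by_cases e1 : g < (o.base + o.size) / 8
    · rw [shadowOf_unpoisonMem_full mem o.base o.size g h8 hhi hg1 e1]
      omega
    · have e2 : g = (o.base + o.size) / 8 := by omega
      have e3 : o.size % 8 ≠ 0 := by omega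
      rw [e2, shadowOf_unpoisonMem_part mem o.base o.size h8 hhi e3]
      omega
  · intro o' ho'
    rcases List.mem_cons.mp ho' with rfl | hold
    · exact Or.inr (coversObj_unpoisonMem mem o' h8 hlo hhi).covers
    · left
      refine ⟨hold, ?_⟩
      have := hdisj o' hold
      unfold GranDisj at this
      omega
  · intro o' ho'
    rcases List.mem_cons.mp ho' with rfl | hold
    · exact hoff
    · exact h.off o' hold
  · exact List.pairwise_cons.mpr ⟨hdisj, (List.pairwise_append.mp h.shadow.disjoint).2.1⟩

/-- **`arena_poison(a, n)`: − the objects in the poisoned range**, which lies off the stack. -/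
theorem poison (h : ShadowInv others frames top mem) (a n : Nat) (h8 : a % 8 = 0) (hlo : 0x100000 ≤ a)
    (hhi : a + (n + 7) / 8 * 8 ≤ 0xC00000) (hoffs : a + (n + 7) / 8 * 8 ≤ 0x700000 ∨ 0x800000 ≤ a) (hs : others'.Sublist others)
    (hout : ∀ o, o ∈ others' → o.gHi ≤ a / 8 ∨ (a + n + 7) / 8 ≤ o.gLo) : ShadowInv others' frames top (poisonMem mem a n) := by
  refine h.change (a / 8) ((a + n + 7) / 8) (by omega) (by omega) ?_ ?_ ?_ ?_ ?_
  · intro g hg hg2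
    exact shadowOf_poisonMem_out mem a n g h8 hhi hg hg2
  · intro g hg hg1 hg2
    rw [shadowOf_poisonMem_in mem a n g h8 hhi hg1 hg2]
    unfold WFv
    omega
  · intro o ho
    exact Or.inl ⟨hs.subset ho, hout o ho⟩
  · intro o ho
    exact h.off o (hs.subset ho)
  · exact (List.pairwise_append.mp h.shadow.disjoint).2.1.sublist hs

/-- **`__asan_register_globals`: + the registered globals.** Every slot had shadow 0, the slots are pairwise apart and share no
granule with one of the `others`. (The stack objects are out of the way: the slots lie in the image.) -/
theorem register (h : ShadowInv others frames top mem) (ds : List GlobalDesc) (hok : ∀ d, d ∈ ds → d.OK)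
    (hclean : ∀ d, d ∈ ds → Clean mem d.beg (d.beg + d.sizeRz)) (hapart : ds.Pairwise GlobalDesc.Apart)
    (hoff : ∀ d, d ∈ ds → ∀ o, o ∈ others → d.Off o) :
    ShadowInv ((ds.map GlobalDesc.obj).reverse ++ others) frames top (registerMem mem ds) := by
  have hlo := h.stack.lo
  refine ⟨?_, ?_, ?_, sealed_registerMem h.sealed ds hok⟩
  · have hreg := h.shadow.register ds hok hclean hapart ?_
    · exact hreg.perm (List.perm_append_comm_assoc _ _ _)
    · intro d hd o ho
      rcases List.mem_append.mp ho with hst | hoth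
      · obtain ⟨bF, hbF, k1, k2⟩ := stackObj_gran h.stack hst
        obtain ⟨_, j2, j3, j4, _⟩ := h.stack.active bF hbF
        obtain ⟨d1, d2, d3, d4, d5⟩ := hok d hd
        unfold GlobalDesc.Off
        omega
      · exact hoff d hd o hoth
  · exact h.stack.of_same (fun g hg1 hg2 => shadowOf_registerMem_high mem ds hok g (by omega) (by omega))
  · intro o ho
    rcases List.mem_append.mp ho with hnew | hold
    · obtain ⟨o', ho', e⟩ := List.mem_map.mp (List.mem_reverse.mp hnew)
      obtain ⟨d1, d2, d3, d4, d5⟩ := hok o' ho'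
      rw [← e]
      unfold OffStack GlobalDesc.obj
      simp only
      omega
    · exact h.off o hold

end ShadowInv

end Asan
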